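-- pv_equiv track=rewrite | github.com/thomy03/midas-trading-bot | src/execution/execution_bridge.py | _get_currency_for_symbol
-- ===== SOURCE A (Python) =====
-- def _get_currency_for_symbol(symbol: str) -> str:
--     """Determine currency based on symbol suffix."""
--     suffixes_eur = ('.PA', '.DE', '.AS', '.BR', '.MI', '.MC', '.LS')
--     suffixes_gbp = ('.L',)
--     suffixes_chf = ('.SW',)
--     if any(symbol.upper().endswith(s) for s in suffixes_eur):
--         return 'EUR'
--     if any(symbol.upper().endswith(s) for s in suffixes_gbp):
--         return 'GBP'
--     if any(symbol.upper().endswith(s) for s in suffixes_chf):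
--         return 'CHF'
--     return 'USD'
-- ===== SOURCE B (Python) =====
-- _SUFFIX_CURRENCY = {
--     'PA': 'EUR', 'DE': 'EUR', 'AS': 'EUR', 'BR': 'EUR',
--     'MI': 'EUR', 'MC': 'EUR', 'LS': 'EUR',
--     'L': 'GBP',
--     'SW': 'CHF',
-- }
--
-- def _get_currency_for_symbol(symbol: str) -> str:
--     """Determine currency based on symbol suffix."""
--     parts = symbol.upper().rsplit('.', 1)
--     if len(parts) == 1:
--         return 'USD'
--     return _SUFFIX_CURRENCY.get(parts[1], 'USD')
-- ===== Notes on version B (the rewrite author's own statement) =====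
-- stated objective: idiomatic
-- what changed: Replaces the three sequential any(endswith) scans over suffix tuples by extracting the segment after the last dot with one rsplit and doing a single dict lookup, defaulting to USD when the symbol has no dot or an unknown suffix.
import Mathlib
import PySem

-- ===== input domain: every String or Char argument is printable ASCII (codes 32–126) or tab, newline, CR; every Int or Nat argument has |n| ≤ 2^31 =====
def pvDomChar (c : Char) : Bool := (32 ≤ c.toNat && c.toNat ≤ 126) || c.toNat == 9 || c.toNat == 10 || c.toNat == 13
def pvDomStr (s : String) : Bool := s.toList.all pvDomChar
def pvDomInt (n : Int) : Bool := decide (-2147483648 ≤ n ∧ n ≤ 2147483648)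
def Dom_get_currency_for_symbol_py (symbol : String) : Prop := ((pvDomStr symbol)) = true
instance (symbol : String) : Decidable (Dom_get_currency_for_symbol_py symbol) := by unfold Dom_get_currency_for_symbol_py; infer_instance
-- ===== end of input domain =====

-- B replaces A's three any(endswith) scans by extracting the segment after the last '.'
-- and one dict lookup (objective: idiomatic; same observable behaviour).

-- ===== PORT A =====
def get_currency_for_symbol_py (symbol : String) : String :=
  let suffixes_eur := [".PA", ".DE", ".AS", ".BR", ".MI", ".MC", ".LS"]
  let suffixes_gbp := [".L"]
  let suffixes_chf := [".SW"]
  if suffixes_eur.any (fun s => PySem.Str.endswith (PySem.Str.upper symbol) s) then "EUR"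
  else if suffixes_gbp.any (fun s => PySem.Str.endswith (PySem.Str.upper symbol) s) then "GBP"
  else if suffixes_chf.any (fun s => PySem.Str.endswith (PySem.Str.upper symbol) s) then "CHF"
  else "USD"

-- ===== PORT B =====
def pvSuffixCurrency : PySem.Dict String String :=
  PySem.Dict.ofList [("PA", "EUR"), ("DE", "EUR"), ("AS", "EUR"), ("BR", "EUR"),
                     ("MI", "EUR"), ("MC", "EUR"), ("LS", "EUR"),
                     ("L", "GBP"), ("SW", "CHF")]

-- hand port of s.rsplit('.', 1)[-1]: exact — the segment after the LAST '.', none when s has no '.'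
def pvLastDotSegment (cs : List Char) : Option (List Char) :=
  if '.' ∈ cs then some (cs.reverse.takeWhile (· ≠ '.')).reverse else none

def get_currency_for_symbol_py_alt (symbol : String) : String :=
  match pvLastDotSegment (PySem.Str.upper symbol).toList with
  | none => "USD"
  | some seg => (pvSuffixCurrency.get? (String.ofList seg)).getD "USD"

-- ===== PRECONDITION & SPEC =====
def Spec_get_currency_for_symbol_py (symbol : String) (out : String) : Prop := out = get_currency_for_symbol_py_alt symbol
instance (symbol : String) (out : String) : Decidable (Spec_get_currency_for_symbol_py symbol out) := by unfold Spec_get_currency_for_symbol_py; infer_instance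

-- ===== CLAIM (what is proved, stated in full; the proofs are below) =====
def Claim_equal_get_currency_for_symbol_py : Prop := ∀ (symbol : String), Dom_get_currency_for_symbol_py symbol → Spec_get_currency_for_symbol_py symbol (get_currency_for_symbol_py symbol)

-- ===== LEMMAS AND PROOFS =====

theorem pv_tw_prefix (s rest : List Char) (hs : '.' ∉ s) :
    (s ++ '.' :: rest).takeWhile (· ≠ '.') = s := by
  induction s with
  | nil => simp
  | cons c t ih =>
    simp only [List.mem_cons, not_or] at hs
    have hc : ¬ c = '.' := fun h => hs.1 h.symm
    have := ih hs.2
    simp only [ne_eq, decide_not] at this ⊢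
    simp [hc, this]

theorem pv_dropWhile_cons_prop (p : Char → Bool) (r : List Char) (c : Char) (tl : List Char)
    (h : r.dropWhile p = c :: tl) : p c = false := by
  induction r with
  | nil => simp at h
  | cons a t ih =>
    by_cases hp : p a
    · rw [List.dropWhile_cons_of_pos hp] at h; exact ih h
    · rw [List.dropWhile_cons_of_neg hp] at h
      cases h; simpa using hp

-- a dotted suffix test IS "there is a dot, and the part after the last dot is the tag"
theorem pv_pref_iff (r s : List Char) (hs : '.' ∉ s) :
    (s ++ ['.']) <+: r ↔ ('.' ∈ r ∧ r.takeWhile (· ≠ '.') = s) := by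
  constructor
  · rintro ⟨rest, hr⟩
    rw [List.append_assoc] at hr
    subst hr
    exact ⟨by simp, pv_tw_prefix s rest hs⟩
  · rintro ⟨hmem, htw⟩
    have hsplit := List.takeWhile_append_dropWhile (p := (· ≠ '.')) (l := r)
    have hne : r.dropWhile (· ≠ '.') ≠ [] := by
      intro h
      rw [h, List.append_nil, htw] at hsplit
      exact hs (hsplit ▸ hmem)
    obtain ⟨c, tl, hct⟩ := List.exists_cons_of_ne_nil hne
    have hc : c = '.' := by
      have := pv_dropWhile_cons_prop _ _ _ _ hct
      simpa using this
    subst hc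
    refine ⟨tl, ?_⟩
    rw [List.append_assoc, List.singleton_append, ← htw, ← hct]
    exact hsplit

theorem pv_ends_iff (u t : List Char) (ht : '.' ∉ t) :
    (('.' :: t) <:+ u) ↔ ('.' ∈ u ∧ u.reverse.takeWhile (· ≠ '.') = t.reverse) := by
  have h := pv_pref_iff u.reverse t.reverse (by simpa using ht)
  constructor
  · intro h2
    have hp : (t.reverse ++ ['.']) <+: u.reverse := by
      rw [← List.reverse_cons]
      exact List.reverse_prefix.mpr h2
    obtain ⟨hm, he⟩ := h.mp hp
    exact ⟨List.mem_reverse.mp hm, he⟩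
  · rintro ⟨h1, h2⟩
    have hp := h.mpr ⟨List.mem_reverse.mpr h1, h2⟩
    rw [← List.reverse_cons] at hp
    exact List.reverse_prefix.mp hp

theorem pv_endswith_decide (symbol : String) (p : String) (t : List Char)
    (hp : p.toList = '.' :: t) (ht : '.' ∉ t) :
    PySem.Str.endswith (PySem.Str.upper symbol) p =
      decide ('.' ∈ (PySem.Str.upper symbol).toList ∧
        (PySem.Str.upper symbol).toList.reverse.takeWhile (· ≠ '.') = t.reverse) := by
  rw [Bool.eq_iff_iff]
  simp only [decide_eq_true_eq]
  rw [PySem.Str.endswith_eq, hp, PySem.Chars.endswith_iff]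
  exact pv_ends_iff _ t ht

theorem pv_key_ne (x : List Char) (k : String) (h : x ≠ k.toList.reverse) :
    ¬ (String.ofList x.reverse = k) := by
  intro he
  apply h
  have h2 := congrArg String.toList he.symm
  rw [String.toList_ofList] at h2
  rw [h2, List.reverse_reverse]

theorem get_currency_for_symbol_py_spec : Claim_equal_get_currency_for_symbol_py := by
  intro symbol _
  unfold Spec_get_currency_for_symbol_py
  unfold get_currency_for_symbol_py get_currency_for_symbol_py_alt
  simp only [List.any_cons, List.any_nil, Bool.or_false]
  rw [pv_endswith_decide symbol ".PA" ['P','A'] (by decide) (by decide),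
      pv_endswith_decide symbol ".DE" ['D','E'] (by decide) (by decide),
      pv_endswith_decide symbol ".AS" ['A','S'] (by decide) (by decide),
      pv_endswith_decide symbol ".BR" ['B','R'] (by decide) (by decide),
      pv_endswith_decide symbol ".MI" ['M','I'] (by decide) (by decide),
      pv_endswith_decide symbol ".MC" ['M','C'] (by decide) (by decide),
      pv_endswith_decide symbol ".LS" ['L','S'] (by decide) (by decide),
      pv_endswith_decide symbol ".L" ['L'] (by decide) (by decide),
      pv_endswith_decide symbol ".SW" ['S','W'] (by decide) (by decide)]
  simp only [PySem.Str.toList_upper]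
  set u := PySem.Chars.upper symbol.toList with hu
  clear_value u
  by_cases hdot : '.' ∈ u
  · simp only [pvLastDotSegment, hdot, true_and]
    set x := u.reverse.takeWhile (· ≠ '.') with hx
    clear_value x
    by_cases h1 : x = ['A','P']; · subst h1; decide
    by_cases h2 : x = ['E','D']; · subst h2; decide
    by_cases h3 : x = ['S','A']; · subst h3; decide
    by_cases h4 : x = ['R','B']; · subst h4; decide
    by_cases h5 : x = ['I','M']; · subst h5; decide
    by_cases h6 : x = ['C','M']; · subst h6; decide
    by_cases h7 : x = ['S','L']; · subst h7; decide
    by_cases h8 : x = ['L']; · subst h8; decide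
    by_cases h9 : x = ['W','S']; · subst h9; decide
    simp [h1, h2, h3, h4, h5, h6, h7, h8, h9, pvSuffixCurrency, PySem.Dict.ofList,
          PySem.Dict.update, PySem.Dict.get?_insert, PySem.Dict.get?_empty,
          pv_key_ne x "PA" (by simpa using h1), pv_key_ne x "DE" (by simpa using h2),
          pv_key_ne x "AS" (by simpa using h3), pv_key_ne x "BR" (by simpa using h4),
          pv_key_ne x "MI" (by simpa using h5), pv_key_ne x "MC" (by simpa using h6),
          pv_key_ne x "LS" (by simpa using h7), pv_key_ne x "L" (by simpa using h8),
          pv_key_ne x "SW" (by simpa using h9)]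
  · simp [pvLastDotSegment, hdot]
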